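-- pv_equiv track=rewrite | github.com/Akash2126/qa-agent | backend/agent/coverage.py | _count_covered_functions
-- ===== SOURCE A (Python) =====
-- from typing import List, Dict, Any
--
-- def _count_covered_functions(functions: list, test_cases: List[Dict]) -> int:
--     """Count how many functions appear in at least one test case."""
--     covered = 0
--     all_test_text = " ".join(
--         f"{tc.get('name','')} {tc.get('input','')} {tc.get('description','')}"
--         for tc in test_cases
--     ).lower()
--     for fn in functions:
--         if fn.lower() in all_test_text:
--             covered += 1
--     return covered
-- ===== SOURCE B (Python) =====
-- def _count_covered_functions(functions, test_cases):
--     """Count how many functions appear in at least one test case.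
--
--     Single left-to-right scan of the combined test text: at each position the
--     still-uncovered names that start there are marked covered and dropped, and
--     the scan stops early once every name is covered.
--     """
--     text = " ".join(
--         f"{tc.get('name','')} {tc.get('input','')} {tc.get('description','')}"
--         for tc in test_cases
--     ).lower()
--     remaining = [fn.lower() for fn in functions]
--     covered = len([p for p in remaining if p == ""])  # empty names match trivially
--     remaining = [p for p in remaining if p != ""]
--     for i in range(len(text)):
--         if not remaining:
--             break
--         covered += len([p for p in remaining if text.startswith(p, i)])
--         remaining = [p for p in remaining if not text.startswith(p, i)]
--     return covered
-- ===== Notes on version B (the rewrite author's own statement) =====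
-- stated objective: alternative
-- what changed: B inverts the traversal: instead of one substring search per function over the whole text, it makes a single left-to-right scan of the text, at each position marking and removing the still-uncovered lowered names that start there (str.startswith with an offset), with an early stop once all names are covered; empty names are counted up front.
import Mathlib
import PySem

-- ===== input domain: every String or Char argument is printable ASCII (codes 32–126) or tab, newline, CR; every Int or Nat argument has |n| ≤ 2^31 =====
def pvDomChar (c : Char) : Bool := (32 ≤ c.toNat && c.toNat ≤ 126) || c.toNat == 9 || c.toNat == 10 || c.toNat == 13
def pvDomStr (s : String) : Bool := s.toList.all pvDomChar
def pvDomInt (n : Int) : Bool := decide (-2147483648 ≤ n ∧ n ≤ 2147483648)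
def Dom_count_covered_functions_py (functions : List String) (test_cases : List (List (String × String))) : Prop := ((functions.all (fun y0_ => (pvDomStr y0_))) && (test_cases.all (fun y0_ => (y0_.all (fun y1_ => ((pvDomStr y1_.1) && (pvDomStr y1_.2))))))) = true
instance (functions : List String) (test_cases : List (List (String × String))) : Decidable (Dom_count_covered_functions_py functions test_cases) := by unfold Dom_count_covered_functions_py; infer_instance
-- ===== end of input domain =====

-- B inverts the traversal: one left-to-right scan of the combined text, marking and
-- removing the still-uncovered names that start at each position, with an early
-- stop once all are covered; objective: alternative (same asymptotic cost).

-- ===== PORT A =====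
def count_covered_functions_py (functions : List String) (test_cases : List (List (String × String))) : Int :=
  let all_test_text := PySem.Str.lower (PySem.Str.join " "
    (test_cases.map (fun tc =>
      PySem.Dict.getD ⟨tc⟩ "name" "" ++ " " ++ PySem.Dict.getD ⟨tc⟩ "input" "" ++ " " ++
        PySem.Dict.getD ⟨tc⟩ "description" "")))
  functions.foldl (fun covered fn =>
    if PySem.Str.isIn (PySem.Str.lower fn) all_test_text then covered + 1 else covered) 0

-- ===== PORT B =====
-- exact port of Python's text.startswith(p, i) for 0 ≤ i ≤ len(text): prefix test at offset i
def pvStartsAt (text p : String) (i : Nat) : Bool :=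
  PySem.Chars.startswith (text.toList.drop i) p.toList

def count_covered_functions_py_alt (functions : List String) (test_cases : List (List (String × String))) : Int :=
  let text := PySem.Str.lower (PySem.Str.join " "
    (test_cases.map (fun tc =>
      PySem.Dict.getD ⟨tc⟩ "name" "" ++ " " ++ PySem.Dict.getD ⟨tc⟩ "input" "" ++ " " ++
        PySem.Dict.getD ⟨tc⟩ "description" "")))
  let rem0 := functions.map PySem.Str.lower
  let covered0 : Int := ((rem0.filter (fun p => p == "")).length : Int)
  let rem1 := rem0.filter (fun p => p != "")
  -- for i in range(len(text)): if not remaining: break; covered += …; remaining = …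
  ((List.range text.toList.length).foldl
    (fun st i =>
      if st.2.isEmpty then st
      else (st.1 + ((st.2.filter (fun p => pvStartsAt text p i)).length : Int),
            st.2.filter (fun p => !pvStartsAt text p i)))
    (covered0, rem1)).1

-- ===== PRECONDITION & SPEC =====
def Spec_count_covered_functions_py (functions : List String) (test_cases : List (List (String × String))) (out : Int) : Prop := out = count_covered_functions_py_alt functions test_cases
instance (functions : List String) (test_cases : List (List (String × String))) (out : Int) : Decidable (Spec_count_covered_functions_py functions test_cases out) := by unfold Spec_count_covered_functions_py; infer_instance

-- ===== CLAIM (what is proved, stated in full; the proofs are below) =====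
def Claim_equal_count_covered_functions_py : Prop := ∀ (functions : List String) (test_cases : List (List (String × String))), Dom_count_covered_functions_py functions test_cases → Spec_count_covered_functions_py functions test_cases (count_covered_functions_py functions test_cases)

-- ===== LEMMAS AND PROOFS =====

-- countP splits across a filter partition
theorem pv_countP_filter_partition (P Q : String → Bool) :
    ∀ l : List String,
      l.countP Q = (l.filter P).countP Q + (l.filter (fun x => !P x)).countP Q
  | [] => by simp
  | x :: t => by
      have ih := pv_countP_filter_partition P Q t
      by_cases hP : P x = true <;> by_cases hQ : Q x = true <;>
        simp [hP, hQ, ih] <;> omega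

-- one scan step, with the 'break' guard removed (it is the identity on an empty set)
theorem pv_step_eq (text : String) (i : Nat) (st : Int × List String) :
    (if st.2.isEmpty then st
     else (st.1 + ((st.2.filter (fun p => pvStartsAt text p i)).length : Int),
           st.2.filter (fun p => !pvStartsAt text p i)))
    = (st.1 + ((st.2.filter (fun p => pvStartsAt text p i)).length : Int),
       st.2.filter (fun p => !pvStartsAt text p i)) := by
  rcases st with ⟨c, rem⟩
  cases rem <;> simp

-- scan invariant: the fold counts each pattern matched at some scanned position
theorem pv_scan_count (text : String) :
    ∀ (idxs : List Nat) (c : Int) (rem : List String),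
      (idxs.foldl
        (fun st i =>
          if st.2.isEmpty then st
          else (st.1 + ((st.2.filter (fun p => pvStartsAt text p i)).length : Int),
                st.2.filter (fun p => !pvStartsAt text p i)))
        (c, rem)).1
      = c + ((rem.countP (fun p => idxs.any (fun i => pvStartsAt text p i)) : Nat) : Int)
  | [], c, rem => by simp
  | i :: idxs, c, rem => by
      rw [List.foldl_cons, pv_step_eq]
      rw [pv_scan_count text idxs]
      have hsplit := pv_countP_filter_partition (fun p => pvStartsAt text p i)
        (fun p => (i :: idxs).any (fun j => pvStartsAt text p j)) rem
      have h1 : (rem.filter (fun p => pvStartsAt text p i)).countP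
          (fun p => (i :: idxs).any (fun j => pvStartsAt text p j))
          = (rem.filter (fun p => pvStartsAt text p i)).length := by
        rw [List.countP_eq_length]
        intro p hp
        have := List.of_mem_filter hp
        simp [List.any_cons, this]
      have h2 : (rem.filter (fun p => !pvStartsAt text p i)).countP
          (fun p => (i :: idxs).any (fun j => pvStartsAt text p j))
          = (rem.filter (fun p => !pvStartsAt text p i)).countP
              (fun p => idxs.any (fun j => pvStartsAt text p j)) := by
        refine List.countP_congr ?_
        intro p hp
        have := List.of_mem_filter hp
        simp only [Bool.not_eq_true'] at this
        simp [List.any_cons, this]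
      rw [hsplit, h1, h2]
      push_cast
      ring

-- a nonempty pattern occurs in the text iff it starts at some scanned position
theorem pv_any_startsAt_eq_isIn (text p : String) (hp : p ≠ "") :
    (List.range text.toList.length).any (fun i => pvStartsAt text p i)
      = PySem.Str.isIn p text := by
  have key : ((List.range text.toList.length).any (fun i => pvStartsAt text p i)) = true
      ↔ PySem.Str.isIn p text = true := by
    rw [PySem.Str.isIn_eq, ← PySem.Chars.exists_prefix_drop_iff_isIn, List.any_eq_true]
    constructor
    · rintro ⟨i, _, hi⟩
      exact ⟨i, (PySem.Chars.startswith_iff _ _).mp hi⟩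
    · rintro ⟨j, hj⟩
      have hpl : p.toList ≠ [] := by
        intro h; exact hp (String.toList_eq_nil_iff.mp h)
      have hjlt : j < text.toList.length := by
        by_contra hge
        rw [List.drop_eq_nil_of_le (by omega)] at hj
        exact hpl (List.prefix_nil.mp hj)
      exact ⟨j, List.mem_range.mpr hjlt, (PySem.Chars.startswith_iff _ _).mpr hj⟩
  exact Bool.eq_iff_iff.mpr key

-- the empty pattern always occurs
theorem pv_isIn_empty (text : String) : PySem.Str.isIn "" text = true := by
  rw [PySem.Str.isIn_eq]
  exact PySem.Chars.isIn_nil _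

-- the whole equivalence, for an abstract text
theorem pv_main (text : String) (functions : List String) :
    (functions.foldl (fun covered fn =>
      if PySem.Str.isIn (PySem.Str.lower fn) text then covered + 1 else covered) (0 : Int))
    = ((List.range text.toList.length).foldl
        (fun st i =>
          if st.2.isEmpty then st
          else (st.1 + ((st.2.filter (fun p => pvStartsAt text p i)).length : Int),
                st.2.filter (fun p => !pvStartsAt text p i)))
        ((((functions.map PySem.Str.lower).filter (fun p => p == "")).length : Int),
         (functions.map PySem.Str.lower).filter (fun p => p != ""))).1 := by
  rw [PySem.List.foldl_if_add_one, pv_scan_count]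
  have h2 : ((functions.map PySem.Str.lower).filter (fun p => p != "")).countP
      (fun p => (List.range text.toList.length).any (fun i => pvStartsAt text p i))
      = ((functions.map PySem.Str.lower).filter (fun p => p != "")).countP
          (fun p => PySem.Str.isIn p text) := by
    refine List.countP_congr ?_
    intro p hp
    have hne := List.of_mem_filter hp
    simp only [bne_iff_ne, ne_eq] at hne
    rw [pv_any_startsAt_eq_isIn text p hne]
  have h1 : ((functions.map PySem.Str.lower).filter (fun p => p == "")).countP
      (fun p => PySem.Str.isIn p text)
      = ((functions.map PySem.Str.lower).filter (fun p => p == "")).length := by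
    rw [List.countP_eq_length]
    intro p hp
    have he := List.of_mem_filter hp
    rw [beq_iff_eq] at he
    rw [he]
    exact pv_isIn_empty text
  have hsplit := pv_countP_filter_partition (fun p => p == "")
    (fun p => PySem.Str.isIn p text) (functions.map PySem.Str.lower)
  have hfneg : (functions.map PySem.Str.lower).filter (fun p => !(p == ""))
      = (functions.map PySem.Str.lower).filter (fun p => p != "") := by
    refine List.filter_congr ?_
    intro p _
    simp [bne]
  rw [hfneg] at hsplit
  have hmap : (functions.map PySem.Str.lower).countP (fun p => PySem.Str.isIn p text)
      = functions.countP (fun fn => PySem.Str.isIn (PySem.Str.lower fn) text) := by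
    rw [List.countP_map]
    rfl
  rw [h2, ← h1, ← Nat.cast_add, ← hsplit, hmap]
  omega

-- ===== VERDICT (by name: the statement is the Claim_ definition above) =====
theorem count_covered_functions_py_spec : Claim_equal_count_covered_functions_py := by
  intro functions test_cases _
  unfold Spec_count_covered_functions_py
  exact pv_main _ functions
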